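-- pv_equiv track=rewrite | github.com/JupiterXiaoxiaoYu/ava-trading-esp32 | server/main/xiaozhi-server/plugins_func/functions/ave_tools.py | _split_token_reference
-- ===== SOURCE A (Python) =====
-- _CHAIN_SUFFIXES = ("solana", "bsc", "eth", "base")
--
-- def _split_token_reference(token_ref: str, chain: str = "solana") -> tuple[str, str]:
--     token_text = str(token_ref or "").strip()
--     chain_text = str(chain or "solana").strip().lower() or "solana"
--     if not token_text:
--         return "", chain_text
--
--     token_lower = token_text.lower()
--     for suffix_chain in _CHAIN_SUFFIXES:
--         suffix = f"-{suffix_chain}"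
--         if token_lower.endswith(suffix):
--             base_addr = token_text[:-len(suffix)]
--             if base_addr:
--                 return base_addr, suffix_chain
--     return token_text, chain_text
-- ===== SOURCE B (Python) =====
-- _CHAIN_SUFFIX_SET = frozenset(("solana", "bsc", "eth", "base"))
--
-- def _split_token_reference(token_ref: str, chain: str = "solana") -> tuple[str, str]:
--     token_text = str(token_ref or "").strip()
--     chain_text = str(chain or "solana").strip().lower() or "solana"
--     if not token_text:
--         return "", chain_text
--
--     i = token_text.rfind("-")
--     if i > 0:
--         suffix = token_text[i + 1:].lower()
--         if suffix in _CHAIN_SUFFIX_SET: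
--             return token_text[:i], suffix
--     return token_text, chain_text
-- ===== Notes on version B (the rewrite author's own statement) =====
-- stated objective: simpler
-- what changed: Replaces the loop that tries each of the four candidate chain suffixes with endswith by a single rfind of the hyphen that locates the candidate suffix in the data, plus one set-membership test.
import Mathlib
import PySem

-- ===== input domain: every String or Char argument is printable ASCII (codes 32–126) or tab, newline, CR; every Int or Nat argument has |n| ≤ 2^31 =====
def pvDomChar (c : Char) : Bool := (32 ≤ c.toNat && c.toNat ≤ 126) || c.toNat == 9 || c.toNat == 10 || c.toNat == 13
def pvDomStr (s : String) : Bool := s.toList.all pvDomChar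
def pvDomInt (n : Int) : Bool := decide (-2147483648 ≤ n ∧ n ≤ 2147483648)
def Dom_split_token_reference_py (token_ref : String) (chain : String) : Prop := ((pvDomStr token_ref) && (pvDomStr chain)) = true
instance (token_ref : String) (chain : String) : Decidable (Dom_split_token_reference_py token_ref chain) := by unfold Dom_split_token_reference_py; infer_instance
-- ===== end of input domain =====

-- B replaces A's loop over the four '-<chain>' suffixes (endswith each) by one rfind('-') plus a set lookup; objective: simpler.

-- ===== PORT A =====
-- _CHAIN_SUFFIXES = ("solana", "bsc", "eth", "base")
def pvChainSuffixes : List (List Char) := [['s','o','l','a','n','a'], ['b','s','c'], ['e','t','h'], ['b','a','s','e']]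

-- the 'for suffix_chain in _CHAIN_SUFFIXES' loop with its early return (none = fell through)
def pvSplitLoopA (tt tl : List Char) : List (List Char) → Option (List Char × List Char)
  | [] => none
  | sc :: rest =>
    let suffix := '-' :: sc                                   -- f"-{suffix_chain}"
    if PySem.Chars.endswith tl suffix then
      let base := PySem.List.slice tt none (some (-(suffix.length : Int)))   -- token_text[:-len(suffix)]
      if base ≠ [] then some (base, sc) else pvSplitLoopA tt tl rest
    else pvSplitLoopA tt tl rest

def split_token_reference_py (token_ref : String) (chain : String) : String × String :=
  let tt := PySem.Chars.strip token_ref.toList                -- str(token_ref or "").strip(): 'or' is identity on str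
  let ct :=
    let c := PySem.Chars.lower (PySem.Chars.strip (if chain = "" then "solana".toList else chain.toList))
    if c = [] then "solana".toList else c                     -- … or "solana"
  if tt = [] then ("", String.ofList ct)
  else
    match pvSplitLoopA tt (PySem.Chars.lower tt) pvChainSuffixes with
    | some (b, s) => (String.ofList b, String.ofList s)
    | none => (String.ofList tt, String.ofList ct)

-- ===== PORT B =====
-- _CHAIN_SUFFIX_SET = frozenset(("solana", "bsc", "eth", "base"))
def pvChainSuffixSet : PySem.Set (List Char) := PySem.Set.ofList [['s','o','l','a','n','a'], ['b','s','c'], ['e','t','h'], ['b','a','s','e']]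

def split_token_reference_py_alt (token_ref : String) (chain : String) : String × String :=
  let tt := PySem.Chars.strip token_ref.toList
  let ct :=
    let c := PySem.Chars.lower (PySem.Chars.strip (if chain = "" then "solana".toList else chain.toList))
    if c = [] then "solana".toList else c
  if tt = [] then ("", String.ofList ct)
  else
    let i := PySem.Chars.rfind tt ['-']                       -- token_text.rfind("-")
    if 0 < i then
      let suffix := PySem.Chars.lower (PySem.List.slice tt (some (i + 1)) none)   -- token_text[i+1:].lower()
      if suffix ∈ pvChainSuffixSet then
        (String.ofList (PySem.List.slice tt none (some i)), String.ofList suffix) -- token_text[:i], suffix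
      else (String.ofList tt, String.ofList ct)
    else (String.ofList tt, String.ofList ct)

-- ===== PRECONDITION & SPEC =====
def Spec_split_token_reference_py (token_ref : String) (chain : String) (out : String × String) : Prop := out = split_token_reference_py_alt token_ref chain
instance (token_ref : String) (chain : String) (out : String × String) : Decidable (Spec_split_token_reference_py token_ref chain out) := by unfold Spec_split_token_reference_py; infer_instance

-- ===== CLAIM (what is proved, stated in full; the proofs are below) =====
def Claim_equal_split_token_reference_py : Prop := ∀ (token_ref : String) (chain : String), Dom_split_token_reference_py token_ref chain → Spec_split_token_reference_py token_ref chain (split_token_reference_py token_ref chain)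

-- ===== LEMMAS AND PROOFS =====

-- lowering a character yields '-' only for '-': uppercase letters lower into 'a'..'z'
theorem pv_lowerChar_hyphen (c : Char) : PySem.Chars.lowerChar c = '-' ↔ c = '-' := by
  unfold PySem.Chars.lowerChar PySem.Chars.isupper
  split_ifs with h
  · simp only [Bool.and_eq_true, decide_eq_true_eq] at h
    rw [Char.le_def] at h
    have h1 : 65 ≤ c.toNat := UInt32.le_iff_toNat_le.mp h.1
    have h2 : c.toNat ≤ 90 := UInt32.le_iff_toNat_le.mp h.2
    constructor
    · intro hc
      have := congrArg Char.toNat hc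
      rw [Char.toNat_ofNat] at this
      have hv : (c.toNat + 32).isValidChar := Or.inl (by omega)
      rw [if_pos hv] at this
      have : c.toNat + 32 = 45 := this
      omega
    · intro hc; subst hc
      have h45 : ('-').toNat = 45 := by decide
      omega
  · exact Iff.rfl

-- hyphens sit at the same positions in a string and its lowercase image
theorem pv_lower_hyphen (tt : List Char) (j : Nat) :
    (PySem.Chars.lower tt)[j]? = some '-' ↔ tt[j]? = some '-' := by
  unfold PySem.Chars.lower
  rw [List.getElem?_map]
  cases h : tt[j]? with
  | none => simp
  | some c => simpa using pv_lowerChar_hyphen c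

theorem pv_singleton_isPrefixOf (c : Char) (s : List Char) :
    [c].isPrefixOf s = true ↔ s[0]? = some c := by
  cases s with
  | nil => simp [List.isPrefixOf]
  | cons a l =>
    simp only [List.isPrefixOf, List.getElem?_cons_zero, Option.some.injEq, Bool.and_true, beq_iff_eq]
    exact eq_comm

-- characterization of rfind's scan for a single character
theorem pv_rfind_go_spec (s : List Char) (c : Char) (n : Nat) :
    (PySem.Chars.rfind.go s [c] n = -1 ∧ ∀ j, j ≤ n → s[j]? ≠ some c) ∨
    (∃ i : Nat, i ≤ n ∧ PySem.Chars.rfind.go s [c] n = i ∧ s[i]? = some c ∧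
      ∀ j, i < j → j ≤ n → s[j]? ≠ some c) := by
  induction n with
  | zero =>
    rw [PySem.Chars.rfind.go.eq_def]
    by_cases h : [c].isPrefixOf s = true
    · right
      exact ⟨0, le_refl 0, by simp [h], (pv_singleton_isPrefixOf c s).mp h, by omega⟩
    · left
      refine ⟨by simp [h], ?_⟩
      intro j hj
      interval_cases j
      intro hc
      exact h ((pv_singleton_isPrefixOf c s).mpr hc)
  | succ n ih =>
    rw [PySem.Chars.rfind.go.eq_def]
    have hpref : [c].isPrefixOf (List.drop (n + 1) s) = true ↔ s[n + 1]? = some c := by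
      rw [pv_singleton_isPrefixOf, List.getElem?_drop]
    by_cases h : [c].isPrefixOf (List.drop (n + 1) s) = true
    · right
      exact ⟨n + 1, le_refl _, by simp [h], hpref.mp h, by omega⟩
    · have hnot : s[n + 1]? ≠ some c := fun hc => h (hpref.mpr hc)
      rcases ih with ⟨he, hall⟩ | ⟨i, hin, he, hc, hall⟩
      · left
        refine ⟨by simp [h, he], ?_⟩
        intro j hj
        rcases Nat.lt_or_ge j (n + 1) with hj' | hj'
        · exact hall j (by omega)
        · have : j = n + 1 := by omega
          subst this; exact hnot
      · right
        refine ⟨i, by omega, by simp [h, he], hc, ?_⟩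
        intro j hij hj
        rcases Nat.lt_or_ge j (n + 1) with hj' | hj'
        · exact hall j hij (by omega)
        · have : j = n + 1 := by omega
          subst this; exact hnot

theorem pv_rfind_spec (s : List Char) (c : Char) :
    (PySem.Chars.rfind s [c] = -1 ∧ ∀ j : Nat, s[j]? ≠ some c) ∨
    (∃ i : Nat, i < s.length ∧ PySem.Chars.rfind s [c] = i ∧ s[i]? = some c ∧
      ∀ j : Nat, i < j → s[j]? ≠ some c) := by
  have hout : ∀ j : Nat, s.length ≤ j → s[j]? ≠ some c := by
    intro j hj
    simp [List.getElem?_eq_none hj]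
  rcases pv_rfind_go_spec s c s.length with ⟨he, hall⟩ | ⟨i, hin, he, hc, hall⟩
  · left
    refine ⟨he, ?_⟩
    intro j
    rcases Nat.lt_or_ge j s.length with hj | hj
    · exact hall j (by omega)
    · exact hout j hj
  · right
    have hilt : i < s.length := by
      rcases Nat.lt_or_ge i s.length with h | h
      · exact h
      · exact absurd hc (hout i h)
    refine ⟨i, hilt, he, hc, ?_⟩
    intro j hij
    rcases Nat.lt_or_ge j s.length with hj | hj
    · exact hall j hij (by omega)
    · exact hout j hj

-- if lower tt ends with '-'::X (X hyphen-free) then the LAST hyphen of tt is at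
-- position |tt|-|X|-1 and everything after it lowers to X
theorem pv_suffix_anatomy (tt X : List Char)
    (hX : ∀ ch ∈ X, ch ≠ '-')
    (h : ('-' :: X) <:+ PySem.Chars.lower tt) :
    X.length + 1 ≤ tt.length ∧
    tt[tt.length - X.length - 1]? = some '-' ∧
    (∀ j, tt.length - X.length - 1 < j → tt[j]? ≠ some '-') ∧
    (PySem.Chars.lower tt).drop (tt.length - X.length) = X := by
  have hlenL : (PySem.Chars.lower tt).length = tt.length := by
    simp [PySem.Chars.lower]
  have hle : X.length + 1 ≤ tt.length := by
    have := h.length_le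
    simp only [List.length_cons, hlenL] at this
    omega
  have hdrop : (PySem.Chars.lower tt).drop (tt.length - X.length - 1) = '-' :: X := by
    have h0 := List.suffix_iff_eq_drop.mp h
    rw [h0]
    congr 1
    simp only [List.length_cons, hlenL]
    omega
  have hgetL : (PySem.Chars.lower tt)[tt.length - X.length - 1]? = some '-' := by
    have : ((PySem.Chars.lower tt).drop (tt.length - X.length - 1))[0]? = some '-' := by
      rw [hdrop]; rfl
    rwa [List.getElem?_drop, Nat.add_zero] at this
  have hdrop1 : (PySem.Chars.lower tt).drop (tt.length - X.length) = X := by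
    have h1 : (PySem.Chars.lower tt).drop (tt.length - X.length) =
        (((PySem.Chars.lower tt).drop (tt.length - X.length - 1)).drop 1) := by
      rw [List.drop_drop]
      congr 1
      omega
    rw [h1, hdrop]
    rfl
  refine ⟨hle, (pv_lower_hyphen tt _).mp hgetL, ?_, hdrop1⟩
  intro j hj hcontra
  have hLj : (PySem.Chars.lower tt)[j]? = some '-' := (pv_lower_hyphen tt j).mpr hcontra
  have hXj : (List.drop (tt.length - X.length) (PySem.Chars.lower tt))[j - (tt.length - X.length)]? = some '-' := by
    rw [List.getElem?_drop, show tt.length - X.length + (j - (tt.length - X.length)) = j by omega]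
    exact hLj
  rw [hdrop1] at hXj
  exact hX '-' (List.mem_of_getElem? hXj) rfl

-- stepping lemmas for A's suffix loop
theorem pvLoop_nil (tt tl : List Char) : pvSplitLoopA tt tl [] = none := rfl

theorem pvLoop_cons_false (tt tl sc : List Char) (rest : List (List Char))
    (h : PySem.Chars.endswith tl ('-' :: sc) = false) :
    pvSplitLoopA tt tl (sc :: rest) = pvSplitLoopA tt tl rest := by
  simp [pvSplitLoopA, h]

theorem pvLoop_cons_true_nonempty (tt tl sc : List Char) (rest : List (List Char))
    (h : PySem.Chars.endswith tl ('-' :: sc) = true)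
    (hb : PySem.List.slice tt none (some (-((('-' :: sc).length : Nat) : Int))) ≠ []) :
    pvSplitLoopA tt tl (sc :: rest) =
      some (PySem.List.slice tt none (some (-((('-' :: sc).length : Nat) : Int))), sc) := by
  show (if PySem.Chars.endswith tl ('-' :: sc) then
      if PySem.List.slice tt none (some (-((('-' :: sc).length : Nat) : Int))) ≠ [] then
        some (PySem.List.slice tt none (some (-((('-' :: sc).length : Nat) : Int))), sc)
      else pvSplitLoopA tt tl rest
    else pvSplitLoopA tt tl rest) = _
  rw [if_pos h, if_pos hb]

theorem pvLoop_cons_true_empty (tt tl sc : List Char) (rest : List (List Char))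
    (h : PySem.Chars.endswith tl ('-' :: sc) = true)
    (hb : PySem.List.slice tt none (some (-((('-' :: sc).length : Nat) : Int))) = []) :
    pvSplitLoopA tt tl (sc :: rest) = pvSplitLoopA tt tl rest := by
  show (if PySem.Chars.endswith tl ('-' :: sc) then
      if PySem.List.slice tt none (some (-((('-' :: sc).length : Nat) : Int))) ≠ [] then
        some (PySem.List.slice tt none (some (-((('-' :: sc).length : Nat) : Int))), sc)
      else pvSplitLoopA tt tl rest
    else pvSplitLoopA tt tl rest) = _
  rw [if_pos h, if_neg (by simpa using hb)]

-- the core equivalence, on the stripped nonempty token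
set_option maxRecDepth 8192 in
theorem pv_core (tt ct : List Char) (htt : tt ≠ []) :
    (match pvSplitLoopA tt (PySem.Chars.lower tt) pvChainSuffixes with
      | some (b, s) => (String.ofList b, String.ofList s)
      | none => (String.ofList tt, String.ofList ct)) =
    (let i := PySem.Chars.rfind tt ['-']
     if 0 < i then
       let suffix := PySem.Chars.lower (PySem.List.slice tt (some (i + 1)) none)
       if suffix ∈ pvChainSuffixSet then
         (String.ofList (PySem.List.slice tt none (some i)), String.ofList suffix)
       else (String.ofList tt, String.ofList ct)
     else (String.ofList tt, String.ofList ct)) := by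
  have hlenL : (PySem.Chars.lower tt).length = tt.length := by
    simp [PySem.Chars.lower]
  rcases pv_rfind_spec tt '-' with ⟨he, hall⟩ | ⟨i, hilt, he, hc, hall⟩
  · -- no hyphen in the token: both fall through
    have hnos : ∀ X : List Char, ('-' :: X) <:+ PySem.Chars.lower tt → False := by
      intro X hsuf
      have hmem : '-' ∈ PySem.Chars.lower tt := hsuf.subset (by simp)
      obtain ⟨j, hj, hget⟩ := List.getElem_of_mem hmem
      have : (PySem.Chars.lower tt)[j]? = some '-' := by
        rw [List.getElem?_eq_getElem hj, hget]
      exact hall j ((pv_lower_hyphen tt j).mp this)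
    have hend : ∀ sc : List Char,
        PySem.Chars.endswith (PySem.Chars.lower tt) ('-' :: sc) = false := by
      intro sc
      rw [Bool.eq_false_iff]
      intro hb
      exact hnos sc ((PySem.Chars.endswith_iff _ _).mp hb)
    rw [show pvChainSuffixes = [['s','o','l','a','n','a'], ['b','s','c'], ['e','t','h'], ['b','a','s','e']] from rfl,
      pvLoop_cons_false _ _ _ _ (hend _), pvLoop_cons_false _ _ _ _ (hend _),
      pvLoop_cons_false _ _ _ _ (hend _), pvLoop_cons_false _ _ _ _ (hend _), pvLoop_nil, he]
    norm_num
  · -- last hyphen of the token at index i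
    set d := (PySem.Chars.lower tt).drop (i + 1) with hd
    have hlend : d.length = tt.length - (i + 1) := by
      rw [hd, List.length_drop, hlenL]
    -- a matching '-<chain>' suffix must sit exactly at the last hyphen
    have hkey : ∀ Y : List Char, (∀ ch ∈ Y, ch ≠ '-') →
        ('-' :: Y) <:+ PySem.Chars.lower tt → d = Y := by
      intro Y hY hsuf
      obtain ⟨hle, hget, hmax, hdrop⟩ := pv_suffix_anatomy tt Y hY hsuf
      have h1 : i ≤ tt.length - Y.length - 1 := by
        by_contra hlt
        exact hmax i (by omega) hc
      have h2 : tt.length - Y.length - 1 ≤ i := by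
        by_contra hlt
        exact hall _ (by omega) hget
      rw [hd, show i + 1 = tt.length - Y.length by omega, hdrop]
    have hiL : i < (PySem.Chars.lower tt).length := by rw [hlenL]; exact hilt
    have hLi : (PySem.Chars.lower tt)[i]? = some '-' := (pv_lower_hyphen tt i).mpr hc
    have hLig : (PySem.Chars.lower tt)[i]'hiL = '-' := by
      have := List.getElem?_eq_getElem hiL
      rw [hLi] at this
      exact (Option.some.injEq _ _).mp this.symm
    have hsufX : ('-' :: d) <:+ PySem.Chars.lower tt := by
      have : (PySem.Chars.lower tt).drop i = '-' :: d := by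
        rw [List.drop_eq_getElem_cons hiL, hLig, hd]
      exact this ▸ List.drop_suffix i (PySem.Chars.lower tt)
    have hendX : PySem.Chars.endswith (PySem.Chars.lower tt) ('-' :: d) = true :=
      (PySem.Chars.endswith_iff _ _).mpr hsufX
    -- B's suffix expression is the lowered tail after the last hyphen
    have hsuffix : PySem.Chars.lower (PySem.List.slice tt (some ((i : Int) + 1)) none) = d := by
      rw [show ((i : Int) + 1) = ((i + 1 : Nat) : Int) by push_cast; ring,
        PySem.List.slice_from tt (by positivity), Int.toNat_natCast, hd]
      exact List.map_drop
    have hbase : ∀ sc : List Char, sc = d →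
        PySem.List.slice tt none (some (-((('-' :: sc).length : Nat) : Int))) = List.take i tt := by
      intro sc hsc
      rw [PySem.List.slice_to_neg_natCast tt _ (by simp)]
      congr 1
      rw [hsc]
      simp only [List.length_cons]
      omega
    have hslice_to : PySem.List.slice tt none (some ((i : Nat) : Int)) = List.take i tt := by
      rw [PySem.List.slice_to tt (by positivity), Int.toNat_natCast]
    by_cases hmem : d ∈ pvChainSuffixSet
    · -- the tail after the last hyphen is one of the four chain names
      have hend_ne : ∀ sc : List Char, (∀ ch ∈ sc, ch ≠ '-') → sc ≠ d →
          PySem.Chars.endswith (PySem.Chars.lower tt) ('-' :: sc) = false := by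
        intro sc hsc hne
        rw [Bool.eq_false_iff]
        intro hb
        exact hne (hkey sc hsc ((PySem.Chars.endswith_iff _ _).mp hb)).symm
      have hX' : d = ['s','o','l','a','n','a'] ∨ d = ['b','s','c'] ∨ d = ['e','t','h'] ∨ d = ['b','a','s','e'] := by
        have hset : pvChainSuffixSet = [['s','o','l','a','n','a'], ['b','s','c'], ['e','t','h'], ['b','a','s','e']] := by
          decide
        rw [hset] at hmem
        simpa using hmem
      by_cases hi0 : 0 < i
      · -- nonempty base: both return (token_text[:i], the chain name)
        have htake : List.take i tt ≠ [] := by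
          simp only [ne_eq, List.take_eq_nil_iff]
          push Not
          exact ⟨by omega, htt⟩
        have hloop : pvSplitLoopA tt (PySem.Chars.lower tt) pvChainSuffixes =
            some (List.take i tt, d) := by
          rw [show pvChainSuffixes = [['s','o','l','a','n','a'], ['b','s','c'], ['e','t','h'], ['b','a','s','e']] from rfl]
          rcases hX' with h | h | h | h
          · rw [pvLoop_cons_true_nonempty _ _ _ _ (h ▸ hendX)
                (by rw [hbase _ h.symm]; exact htake), hbase _ h.symm, ← h]
          · rw [pvLoop_cons_false _ _ _ _ (hend_ne _ (by simp) (by rw [h]; decide)),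
              pvLoop_cons_true_nonempty _ _ _ _ (h ▸ hendX)
                (by rw [hbase _ h.symm]; exact htake), hbase _ h.symm, ← h]
          · rw [pvLoop_cons_false _ _ _ _ (hend_ne _ (by simp) (by rw [h]; decide)),
              pvLoop_cons_false _ _ _ _ (hend_ne _ (by simp) (by rw [h]; decide)),
              pvLoop_cons_true_nonempty _ _ _ _ (h ▸ hendX)
                (by rw [hbase _ h.symm]; exact htake), hbase _ h.symm, ← h]
          · rw [pvLoop_cons_false _ _ _ _ (hend_ne _ (by simp) (by rw [h]; decide)),
              pvLoop_cons_false _ _ _ _ (hend_ne _ (by simp) (by rw [h]; decide)),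
              pvLoop_cons_false _ _ _ _ (hend_ne _ (by simp) (by rw [h]; decide)),
              pvLoop_cons_true_nonempty _ _ _ _ (h ▸ hendX)
                (by rw [hbase _ h.symm]; exact htake), hbase _ h.symm, ← h]
        rw [hloop, he]
        simp only [hsuffix]
        rw [if_pos (show (0 : Int) < (i : Int) by exact_mod_cast hi0), if_pos hmem, hslice_to]
      · -- empty base (the whole token is a hyphen followed by a chain name): the loop keeps going and both fall through
        have hi0' : i = 0 := by omega
        have htake : List.take i tt = [] := by rw [hi0']; rfl
        have step : ∀ sc : List Char, (∀ ch ∈ sc, ch ≠ '-') → ∀ rest,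
            pvSplitLoopA tt (PySem.Chars.lower tt) (sc :: rest) =
              pvSplitLoopA tt (PySem.Chars.lower tt) rest := by
          intro sc hsc rest
          by_cases hsceq : sc = d
          · exact pvLoop_cons_true_empty _ _ _ _ (hsceq ▸ hendX)
              (by rw [hbase _ hsceq]; exact htake)
          · exact pvLoop_cons_false _ _ _ _ (hend_ne _ hsc hsceq)
        have hloop : pvSplitLoopA tt (PySem.Chars.lower tt) pvChainSuffixes = none := by
          rw [show pvChainSuffixes = [['s','o','l','a','n','a'], ['b','s','c'], ['e','t','h'], ['b','a','s','e']] from rfl,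
            step _ (by simp) _, step _ (by simp) _, step _ (by simp) _,
            step _ (by simp) _, pvLoop_nil]
        rw [hloop, he]
        simp only []
        rw [if_neg (show ¬ (0 : Int) < (i : Int) by exact_mod_cast hi0)]
    · -- the tail after the last hyphen is not a chain name: both fall through
      have hend : ∀ sc : List Char, (∀ ch ∈ sc, ch ≠ '-') → sc ∈ pvChainSuffixSet →
          PySem.Chars.endswith (PySem.Chars.lower tt) ('-' :: sc) = false := by
        intro sc hsc hscmem
        rw [Bool.eq_false_iff]
        intro hb
        have := hkey sc hsc ((PySem.Chars.endswith_iff _ _).mp hb)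
        rw [this] at hmem
        exact hmem hscmem
      have hloop : pvSplitLoopA tt (PySem.Chars.lower tt) pvChainSuffixes = none := by
        rw [show pvChainSuffixes = [['s','o','l','a','n','a'], ['b','s','c'], ['e','t','h'], ['b','a','s','e']] from rfl,
          pvLoop_cons_false _ _ _ _ (hend _ (by simp) (by decide)),
          pvLoop_cons_false _ _ _ _ (hend _ (by simp) (by decide)),
          pvLoop_cons_false _ _ _ _ (hend _ (by simp) (by decide)),
          pvLoop_cons_false _ _ _ _ (hend _ (by simp) (by decide)), pvLoop_nil]
      rw [hloop, he]
      simp only [hsuffix]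
      by_cases hi0 : (0 : Int) < (i : Int)
      · rw [if_pos hi0, if_neg hmem]
      · rw [if_neg hi0]

-- ===== VERDICT (by name: the statement is the Claim_ definition above) =====
theorem split_token_reference_py_spec : Claim_equal_split_token_reference_py := by
  intro token_ref chain _
  unfold Spec_split_token_reference_py split_token_reference_py split_token_reference_py_alt
  by_cases h : PySem.Chars.strip token_ref.toList = []
  · simp [h]
  · simp only [h]
    exact pv_core _ _ h
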